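-- pv_equiv track=rewrite | github.com/Lima001/BCC-Logica | criador_expressao.py | formatar_sentenca
-- ===== SOURCE A (Python) =====
-- def formatar_sentenca(lista_tokens):
--     operadores_binarios = {
--         "&":"conj",
--         "|":"disj",
--         "~":"neg",
--         "->":"cond",
--         "<->":"bicon"
--     }
--     operador = ""
--     sentencas_componente = []
--
--     for i in range(len(lista_tokens)):
--         if lista_tokens[i][2] == "OPBIN":
--             operador = operadores_binarios[lista_tokens[i][1]]
--             break
--
--     for i in range(len(lista_tokens)):
--         if lista_tokens[i][2] == "ATOM" or lista_tokens[i][2] == "SENT":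
--
--             cont_negacao = 0
--             j = i-1
--
--             while j >= 0 and lista_tokens[j][2] == "OPUN":
--                 cont_negacao += 1
--                 j -=1
--
--             expressao = "neg("*cont_negacao + lista_tokens[i][1] + ")"*cont_negacao
--
--             sentencas_componente.append(expressao)
--
--     expressao = operador + "("
--
--     for i in range(len(sentencas_componente)):
--         if i != len(sentencas_componente) -1:
--             expressao += sentencas_componente[i] + ","
--
--     expressao += sentencas_componente[-1] + ")"
--
--     return expressao
-- ===== SOURCE B (Python) =====
-- def formatar_sentenca(lista_tokens):
--     operadores_binarios = {
--         "&": "conj",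
--         "|": "disj",
--         "~": "neg",
--         "->": "cond",
--         "<->": "bicon"
--     }
--
--     # One forward pass: count the run of OPUN tokens immediately before each
--     # ATOM/SENT token instead of re-scanning backwards from every atom.
--     componentes = []
--     negacoes = 0
--     for token in lista_tokens:
--         if token[2] == "OPUN":
--             negacoes += 1
--         else:
--             if token[2] == "ATOM" or token[2] == "SENT":
--                 componentes.append("neg(" * negacoes + token[1] + ")" * negacoes)
--             negacoes = 0
--
--     primeiro_opbin = next((t for t in lista_tokens if t[2] == "OPBIN"), None)
--     operador = operadores_binarios[primeiro_opbin[1]] if primeiro_opbin is not None else ""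
--
--     # first component, then comma-prefix each remaining one
--     argumentos = componentes[0]
--     for c in componentes[1:]:
--         argumentos += "," + c
--     return operador + "(" + argumentos + ")"
-- ===== Notes on version B (the rewrite author's own statement) =====
-- stated objective: alternative
-- what changed: Replaced A's index-based pass that rescans backwards over the preceding OPUN run for every ATOM/SENT token (and its all-but-last comma loop plus [-1] access) by a single forward pass keeping a running negation counter, the operator found by a first-match scan, and the components joined first-element-then-comma-prefix; Pre_ excludes inputs where A raises (no ATOM/SENT token -> IndexError; unknown first OPBIN key -> KeyError).
import Mathlib
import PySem

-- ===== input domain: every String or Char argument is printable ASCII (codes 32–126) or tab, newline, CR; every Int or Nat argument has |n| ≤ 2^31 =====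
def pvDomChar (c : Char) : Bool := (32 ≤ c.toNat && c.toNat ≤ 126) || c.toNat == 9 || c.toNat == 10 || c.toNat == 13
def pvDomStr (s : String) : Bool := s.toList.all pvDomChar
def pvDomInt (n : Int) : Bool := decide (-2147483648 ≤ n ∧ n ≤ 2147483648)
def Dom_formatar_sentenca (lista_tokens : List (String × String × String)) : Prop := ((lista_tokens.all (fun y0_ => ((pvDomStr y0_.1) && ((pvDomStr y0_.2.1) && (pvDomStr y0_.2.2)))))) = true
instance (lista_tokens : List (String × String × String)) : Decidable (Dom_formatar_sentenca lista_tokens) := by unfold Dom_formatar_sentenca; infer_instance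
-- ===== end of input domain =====

-- B replaces A's per-atom backward rescan and manual join loop by one forward pass with a running
-- negation counter, a first-match operator scan and a first-element-then-comma-prefix join (objective: alternative decomposition).

-- ===== PORT A =====
-- the operadores_binarios dict (shared literal of both Pythons)
def pvOps : PySem.Dict String String :=
  PySem.Dict.ofList [("&", "conj"), ("|", "disj"), ("~", "neg"), ("->", "cond"), ("<->", "bicon")]

-- Python string repetition s * n (n ≥ 0), exact: "abc" * 2 = "abcabc", s * 0 = ""
def pvStrMul (s : String) : Nat → String
  | 0 => ""
  | n + 1 => s ++ pvStrMul s n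

-- A's first loop: find the first OPBIN token and map it (break = stop at first hit);
-- Pre_ guarantees the dict lookup succeeds (Python raises KeyError otherwise), so getD "" is never taken
def pvOpA : List (String × String × String) → String
  | [] => ""
  | t :: rest => if t.2.2 = "OPBIN" then (pvOps.get? t.2.1).getD "" else pvOpA rest

-- A's inner while loop: j starts at i-1 (argument n = i); counts the consecutive OPUN run backwards.
-- All accessed indices are < i < len, so getD's default is never taken.
def pvNegCount (l : List (String × String × String)) : Nat → Nat
  | 0 => 0
  | j + 1 => if (l.getD j ("", "", "")).2.2 = "OPUN" then pvNegCount l j + 1 else 0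

-- A's second loop over i in range(len(lista_tokens))
def pvCompsA (l : List (String × String × String)) : List String :=
  (List.range l.length).foldl (fun acc i =>
    let t := l.getD i ("", "", "")
    if t.2.2 = "ATOM" ∨ t.2.2 = "SENT" then
      acc ++ [pvStrMul "neg(" (pvNegCount l i) ++ t.2.1 ++ pvStrMul ")" (pvNegCount l i)]
    else acc) []

def formatar_sentenca (lista_tokens : List (String × String × String)) : String :=
  let sentencas_componente := pvCompsA lista_tokens
  let expressao := pvOpA lista_tokens ++ "("
  let expressao := (List.range sentencas_componente.length).foldl (fun acc i =>
    if i ≠ sentencas_componente.length - 1 then acc ++ sentencas_componente.getD i "" ++ "," else acc) expressao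
  -- sentencas_componente[-1]: Pre_ guarantees nonempty (Python raises IndexError on [])
  expressao ++ (PySem.List.pyGet? sentencas_componente (-1)).getD "" ++ ")"

-- ===== PORT B =====
-- B's forward pass step: (components so far, running OPUN count)
def pvStepB (st : List String × Nat) (t : String × String × String) : List String × Nat :=
  if t.2.2 = "OPUN" then (st.1, st.2 + 1)
  else if t.2.2 = "ATOM" ∨ t.2.2 = "SENT" then
    (st.1 ++ [pvStrMul "neg(" st.2 ++ t.2.1 ++ pvStrMul ")" st.2], 0)
  else (st.1, 0)

def formatar_sentenca_alt (lista_tokens : List (String × String × String)) : String :=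
  let componentes := (lista_tokens.foldl pvStepB ([], 0)).1
  -- next((t for t in lista_tokens if t[2] == "OPBIN"), None)
  let operador := match lista_tokens.find? (fun t => t.2.2 == "OPBIN") with
    | some t => (pvOps.get? t.2.1).getD ""   -- Pre_ guarantees the lookup succeeds
    | none => ""
  -- argumentos = componentes[0]; then '+= "," + c' over componentes[1:]
  -- componentes[0]: Pre_ guarantees nonempty (Python raises IndexError on [])
  let argumentos := (componentes.drop 1).foldl (fun acc c => acc ++ "," ++ c)
    ((PySem.List.pyGet? componentes 0).getD "")
  operador ++ "(" ++ argumentos ++ ")"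

-- ===== PRECONDITION & SPEC =====
-- Pre_ excludes exactly the inputs where Python A raises: lists with no ATOM/SENT token
-- (IndexError on sentencas_componente[-1]) and lists whose first OPBIN token is not a key of
-- operadores_binarios (KeyError).
def Pre_formatar_sentenca (lista_tokens : List (String × String × String)) : Prop :=
  (∃ t ∈ lista_tokens, t.2.2 = "ATOM" ∨ t.2.2 = "SENT") ∧
  ((lista_tokens.find? (fun t => t.2.2 == "OPBIN")).all
    (fun t => (["&", "|", "~", "->", "<->"] : List String).contains t.2.1) = true)
instance (lista_tokens : List (String × String × String)) : Decidable (Pre_formatar_sentenca lista_tokens) := by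
  unfold Pre_formatar_sentenca; infer_instance

def pvWitness_formatar_sentenca : (List (String × String × String)) :=
  [("~", "~", "OPUN"), ("p", "p", "ATOM"), ("&", "&", "OPBIN"), ("q", "q", "SENT")]

def Spec_formatar_sentenca (lista_tokens : List (String × String × String)) (out : String) : Prop :=
  out = formatar_sentenca_alt lista_tokens
instance (lista_tokens : List (String × String × String)) (out : String) : Decidable (Spec_formatar_sentenca lista_tokens out) := by
  unfold Spec_formatar_sentenca; infer_instance

-- ===== CLAIM (what is proved, stated in full; the proofs are below) =====
def Claim_equal_formatar_sentenca : Prop := ∀ (lista_tokens : List (String × String × String)), Dom_formatar_sentenca lista_tokens → Pre_formatar_sentenca lista_tokens → Spec_formatar_sentenca lista_tokens (formatar_sentenca lista_tokens)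


-- ===== LEMMAS AND PROOFS =====

-- reference recursion for the component list: running OPUN count, forward
def pvSpecComps (neg : Nat) : List (String × String × String) → List String
  | [] => []
  | t :: r =>
    if t.2.2 = "OPUN" then pvSpecComps (neg + 1) r
    else if t.2.2 = "ATOM" ∨ t.2.2 = "SENT" then
      (pvStrMul "neg(" neg ++ t.2.1 ++ pvStrMul ")" neg) :: pvSpecComps 0 r
    else pvSpecComps 0 r

-- the running OPUN count after processing a list
def pvNegAfter (neg : Nat) : List (String × String × String) → Nat
  | [] => neg
  | t :: r => if t.2.2 = "OPUN" then pvNegAfter (neg + 1) r else pvNegAfter 0 r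

theorem pvNegAfter_append (l : List (String × String × String)) (t : String × String × String) :
    ∀ neg, pvNegAfter neg (l ++ [t]) = if t.2.2 = "OPUN" then pvNegAfter neg l + 1 else 0 := by
  induction l with
  | nil => intro neg; simp [pvNegAfter]
  | cons x xs ih => intro neg; simp only [List.cons_append, pvNegAfter]; split <;> exact ih _

theorem pvNegCount_append (l : List (String × String × String)) (t : String × String × String) :
    ∀ n ≤ l.length, pvNegCount (l ++ [t]) n = pvNegCount l n := by
  intro n hn
  induction n with
  | zero => rfl
  | succ j ih =>
    have hj : j < l.length := by omega
    simp only [pvNegCount, List.getD_append l [t] _ j hj, ih (by omega)]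

theorem pvNegCount_len (l : List (String × String × String)) :
    pvNegCount l l.length = pvNegAfter 0 l := by
  induction l using List.reverseRecOn with
  | nil => rfl
  | append_singleton l t ih =>
    have hlen : (l ++ [t]).length = l.length + 1 := by simp
    rw [hlen, pvNegAfter_append]
    simp only [pvNegCount]
    have hget : (l ++ [t]).getD l.length ("", "", "") = t := by simp [List.getD]
    rw [hget, pvNegCount_append l t l.length (le_refl _), ih]

theorem pvSpecComps_append (l : List (String × String × String)) (t : String × String × String) :
    ∀ neg, pvSpecComps neg (l ++ [t]) = pvSpecComps neg l ++
      (if t.2.2 = "OPUN" then []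
       else if t.2.2 = "ATOM" ∨ t.2.2 = "SENT" then
         [pvStrMul "neg(" (pvNegAfter neg l) ++ t.2.1 ++ pvStrMul ")" (pvNegAfter neg l)]
       else []) := by
  induction l with
  | nil =>
    intro neg
    simp [pvSpecComps, pvNegAfter]
  | cons x xs ih =>
    intro neg
    simp only [List.cons_append, pvSpecComps, pvNegAfter]
    split
    · rw [ih]
    · split <;> simp [ih]

theorem pvCompsA_eq (l : List (String × String × String)) : pvCompsA l = pvSpecComps 0 l := by
  induction l using List.reverseRecOn with
  | nil => rfl
  | append_singleton l t ih =>
    have hlen : (l ++ [t]).length = l.length + 1 := by simp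
    unfold pvCompsA
    rw [hlen, List.range_succ, List.foldl_append]
    have hcongr : (List.range l.length).foldl (fun acc i =>
        let t' := (l ++ [t]).getD i ("", "", "")
        if t'.2.2 = "ATOM" ∨ t'.2.2 = "SENT" then
          acc ++ [pvStrMul "neg(" (pvNegCount (l ++ [t]) i) ++ t'.2.1 ++ pvStrMul ")" (pvNegCount (l ++ [t]) i)]
        else acc) [] = pvCompsA l := by
      unfold pvCompsA
      apply PySem.List.foldl_congr_mem
      intro acc i hi
      have hi' : i < l.length := List.mem_range.mp hi
      simp only [List.getD_append l [t] _ i hi', pvNegCount_append l t i (le_of_lt hi')]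
    rw [hcongr, ih]
    have hget : (l ++ [t]).getD l.length ("", "", "") = t := by simp [List.getD]
    have hcnt : pvNegCount (l ++ [t]) l.length = pvNegAfter 0 l := by
      rw [pvNegCount_append l t l.length (le_refl _), pvNegCount_len]
    simp only [List.foldl_cons, List.foldl_nil, hget, hcnt, pvSpecComps_append]
    by_cases h1 : (t.2.2 = "ATOM" ∨ t.2.2 = "SENT")
    · have h2 : ¬ t.2.2 = "OPUN" := by rcases h1 with h | h <;> simp [h]
      simp [h1, h2]
    · simp only [if_neg h1]
      split <;> simp

theorem pvFoldB (l : List (String × String × String)) :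
    ∀ acc neg, (l.foldl pvStepB (acc, neg)).1 = acc ++ pvSpecComps neg l := by
  induction l with
  | nil => intro acc neg; simp [pvSpecComps]
  | cons x xs ih =>
    intro acc neg
    simp only [List.foldl_cons, pvStepB, pvSpecComps]
    split
    · exact ih acc (neg + 1)
    · split
      · rw [ih]; simp
      · exact ih acc 0

theorem pvOpB_eq (l : List (String × String × String)) :
    (match l.find? (fun t => t.2.2 == "OPBIN") with
      | some t => (pvOps.get? t.2.1).getD ""
      | none => "") = pvOpA l := by
  induction l with
  | nil => rfl
  | cons x xs ih =>
    simp only [List.find?, pvOpA]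
    by_cases h : x.2.2 = "OPBIN"
    · simp [h]
    · simp only [h, if_false]
      rw [← ih]
      have : (x.2.2 == "OPBIN") = false := by simp [h]
      simp [this]

theorem pvSpecComps_ne_nil (l : List (String × String × String)) :
    ∀ neg, (∃ t ∈ l, t.2.2 = "ATOM" ∨ t.2.2 = "SENT") → pvSpecComps neg l ≠ [] := by
  induction l with
  | nil => intro neg h; rcases h with ⟨t, ht, _⟩; cases ht
  | cons x xs ih =>
    intro neg h
    simp only [pvSpecComps]
    split
    · rename_i hx
      apply ih
      rcases h with ⟨t, ht, hty⟩
      rcases List.mem_cons.mp ht with rfl | hmem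
      · rcases hty with h' | h' <;> simp [h'] at hx
      · exact ⟨t, hmem, hty⟩
    · split
      · simp
      · rename_i hx hx2
        apply ih
        rcases h with ⟨t, ht, hty⟩
        rcases List.mem_cons.mp ht with rfl | hmem
        · exact absurd hty hx2
        · exact ⟨t, hmem, hty⟩

theorem pvJoin_singleton (x : String) : PySem.Str.join "," [x] = x := by
  simp [PySem.Str.join, PySem.Chars.join, List.intercalate]

theorem pvJoin_cons (p q : String) (r : List String) :
    PySem.Str.join "," (p :: q :: r) = p ++ "," ++ PySem.Str.join "," (q :: r) := by
  apply String.toList_inj.mp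
  simp [PySem.Str.toList_join, PySem.Chars.join_cons_cons]

theorem pvJoin_cons_ne (p : String) (r : List String) (h : r ≠ []) :
    PySem.Str.join "," (p :: r) = p ++ "," ++ PySem.Str.join "," r := by
  cases r with
  | nil => exact absurd rfl h
  | cons q r' => exact pvJoin_cons p q r'

theorem pvFoldComma (d : List String) :
    ∀ (x e : String), d.foldl (fun acc s => acc ++ s ++ ",") e ++ x = e ++ PySem.Str.join "," (d ++ [x]) := by
  induction d with
  | nil => intro x e; simp [pvJoin_singleton]
  | cons s d' ih =>
    intro x e
    simp only [List.foldl_cons, List.cons_append]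
    rw [ih, pvJoin_cons_ne s (d' ++ [x]) (by simp)]
    simp [String.append_assoc]

theorem pvRangeFoldGetD (d : List String) (e : String) :
    (List.range d.length).foldl (fun acc i => acc ++ d.getD i "" ++ ",") e
      = d.foldl (fun acc s => acc ++ s ++ ",") e := by
  have hmap : (List.range d.length).map (fun i => d.getD i "") = d := by
    apply List.ext_getElem
    · simp
    · intro i h1 h2
      simp [List.getD, List.getElem?_eq_getElem h2]
  conv_rhs => rw [← hmap]
  rw [List.foldl_map]

theorem pvJoinA (c : List String) (e : String) (h : c ≠ []) :
    (List.range c.length).foldl (fun acc i =>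
        if i ≠ c.length - 1 then acc ++ c.getD i "" ++ "," else acc) e
      ++ (PySem.List.pyGet? c (-1)).getD "" ++ ")"
    = e ++ PySem.Str.join "," c ++ ")" := by
  rcases List.eq_nil_or_concat c with rfl | ⟨d, x, rfl⟩
  · exact absurd rfl h
  · simp only [List.concat_eq_append]
    have hlast : PySem.List.pyGet? (d ++ [x]) (-1) = some x := by
      simp [PySem.List.pyGet?, PySem.List.pyIdx?]
    have hlen : (d ++ [x]).length = d.length + 1 := by simp
    rw [hlen, List.range_succ, List.foldl_append]
    have hstep : ∀ e' : String, (List.range d.length).foldl (fun acc i =>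
        if i ≠ d.length + 1 - 1 then acc ++ (d ++ [x]).getD i "" ++ "," else acc) e'
        = d.foldl (fun acc s => acc ++ s ++ ",") e' := by
      intro e'
      rw [← pvRangeFoldGetD]
      apply PySem.List.foldl_congr_mem
      intro acc i hi
      have hi' : i < d.length := List.mem_range.mp hi
      rw [if_pos (by omega : i ≠ d.length + 1 - 1), List.getD_append d [x] _ i hi']
    rw [hstep]
    simp only [List.foldl_cons, List.foldl_nil, hlast, Option.getD_some]
    rw [if_neg (by omega : ¬ d.length ≠ d.length + 1 - 1)]
    rw [pvFoldComma]

-- B's manual join (first component, then comma-prefixed rest) equals ','.join on a nonempty list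
theorem pvFoldCommaPrefix (r : List String) :
    ∀ x : String, r.foldl (fun acc c => acc ++ "," ++ c) x = PySem.Str.join "," (x :: r) := by
  induction r with
  | nil => intro x; simp [pvJoin_singleton]
  | cons q r' ih =>
    intro x
    rw [List.foldl_cons, ih, pvJoin_cons x q r']
    cases r' with
    | nil => simp [pvJoin_singleton]
    | cons z r'' =>
      rw [pvJoin_cons_ne q (z :: r'') (by simp), pvJoin_cons_ne (x ++ "," ++ q) (z :: r'') (by simp)]
      simp [String.append_assoc]

theorem pvJoinB (c : List String) (h : c ≠ []) :
    (c.drop 1).foldl (fun acc x => acc ++ "," ++ x) ((PySem.List.pyGet? c 0).getD "")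
      = PySem.Str.join "," c := by
  cases c with
  | nil => exact absurd rfl h
  | cons x r =>
    have h0 : PySem.List.pyGet? (x :: r) 0 = some x := by
      simp [PySem.List.pyGet?, PySem.List.pyIdx?]
    simp only [List.drop_one, List.tail_cons, h0, Option.getD_some]
    exact pvFoldCommaPrefix r x

-- ===== VERDICT (by name: the statement is the Claim_ definition above) =====
theorem formatar_sentenca_spec : Claim_equal_formatar_sentenca := by
  intro l _hdom hpre
  unfold Spec_formatar_sentenca
  unfold formatar_sentenca formatar_sentenca_alt
  simp only
  rw [pvCompsA_eq, pvFoldB l [] 0, List.nil_append, pvOpB_eq]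
  rw [pvJoinA _ _ (pvSpecComps_ne_nil l 0 hpre.1)]
  rw [pvJoinB _ (pvSpecComps_ne_nil l 0 hpre.1)]
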